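-- pv_equiv track=rewrite | github.com/Aasthaengg/IBMdataset | Python_codes/p03286/s989706205.py | check
-- ===== SOURCE A (Python) =====
-- def check(_n):
--     if _n>0:
--         j=0
--         while True:
--             if pow(2,j)-2*(pow(2,j)-1)//3<=_n<=pow(2,j)+(pow(2,j)-1)//3:
--                 k=j
--                 break
--             else:
--                 j+=2
--     elif _n<0:
--         j=1
--         while True:
--             if -1*pow(2,j)-2*(pow(2,j-1)-1)//3<=_n<=-1*pow(2,j)+(pow(2,j+1)-1)//3:
--                 k=j
--                 break
--             else:
--                 j+=2
--     else:
--         return 0,0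
--     return _n-pow(-2,k),k
-- ===== SOURCE B (Python) =====
-- def check(_n):
--     if _n == 0:
--         return 0, 0
--     if _n > 0:
--         t = ((3 * _n).bit_length() + 1) // 2
--         k = 2 * t - 2
--     else:
--         b = (3 * (-_n) + 1).bit_length()
--         k = 2 * max(0, (b - 2) // 2) + 1
--     return _n - pow(-2, k), k
-- ===== Notes on version B (the rewrite author's own statement) =====
-- stated objective: simpler
-- what changed: A's parity-stepped while-loop search over the negabinary intervals is replaced by a closed-form computation of k via bit_length (of thrice n, shifted by one for negative n), with no loop at all.
import Mathlib
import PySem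

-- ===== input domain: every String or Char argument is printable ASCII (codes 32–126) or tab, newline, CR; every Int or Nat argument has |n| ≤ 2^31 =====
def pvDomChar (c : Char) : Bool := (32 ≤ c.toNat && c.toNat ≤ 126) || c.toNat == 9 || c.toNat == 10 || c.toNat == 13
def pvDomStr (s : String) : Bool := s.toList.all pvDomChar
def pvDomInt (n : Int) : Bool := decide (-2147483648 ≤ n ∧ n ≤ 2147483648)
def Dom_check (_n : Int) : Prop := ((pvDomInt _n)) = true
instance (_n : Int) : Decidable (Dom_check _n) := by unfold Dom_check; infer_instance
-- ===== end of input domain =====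

-- B replaces A's parity-stepped interval search with a direct bit_length computation of k (objective: simpler).

-- ===== PORT A =====
-- pow(b, e) for the nonnegative exponents A uses
def pyPow (b e : Int) : Int := b ^ e.toNat

-- the loop condition for _n > 0 (j even)
def condP (n j : Int) : Bool :=
  decide (pyPow 2 j - 2 * PySem.Int.floordiv (pyPow 2 j - 1) 3 ≤ n ∧
          n ≤ pyPow 2 j + PySem.Int.floordiv (pyPow 2 j - 1) 3)

-- the loop condition for _n < 0 (j odd)
def condN (n j : Int) : Bool :=
  decide (-1 * pyPow 2 j - 2 * PySem.Int.floordiv (pyPow 2 (j - 1) - 1) 3 ≤ n ∧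
          n ≤ -1 * pyPow 2 j + PySem.Int.floordiv (pyPow 2 (j + 1) - 1) 3)

-- A's `while True: … j += 2` search; fuel is only a totality guard (100 steps is
-- never reached on Dom, where the answer index is below 17)
def loopA (cond : Int → Bool) : Nat → Int → Int
  | 0, j => j
  | f + 1, j => if cond j then j else loopA cond f (j + 2)

def check (_n : Int) : Int × Int :=
  if _n > 0 then
    let k := loopA (condP _n) 100 0
    (_n - pyPow (-2) k, k)
  else if _n < 0 then
    let k := loopA (condN _n) 100 1
    (_n - pyPow (-2) k, k)
  else (0, 0)

-- ===== PORT B =====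
def check_alt (_n : Int) : Int × Int :=
  if _n = 0 then (0, 0)
  else if _n > 0 then
    let t := PySem.Int.floordiv ((PySem.Int.bitLength (3 * _n) : Int) + 1) 2
    let k := 2 * t - 2
    (_n - (-2) ^ k.toNat, k)
  else
    let b := (PySem.Int.bitLength (3 * (-_n) + 1) : Int)
    let k := 2 * max 0 (PySem.Int.floordiv (b - 2) 2) + 1
    (_n - (-2) ^ k.toNat, k)

-- ===== PRECONDITION & SPEC =====
def Spec_check (_n : Int) (out : Int × Int) : Prop := out = check_alt _n
instance (_n : Int) (out : Int × Int) : Decidable (Spec_check _n out) := by unfold Spec_check; infer_instance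

-- ===== CLAIM (what is proved, stated in full; the proofs are below) =====
def Claim_equal_check : Prop := ∀ (_n : Int), Dom_check _n → Spec_check _n (check _n)

-- ===== LEMMAS AND PROOFS =====

theorem four_pow_decomp (m : Nat) : ∃ c : Nat, 4 ^ m = 3 * c + 1 := by
  induction m with
  | zero => exact ⟨0, rfl⟩
  | succ m ih => obtain ⟨c, hc⟩ := ih; exact ⟨4 * c + 1, by rw [pow_succ, hc]; ring⟩

theorem fdiv3 (c : Int) : PySem.Int.floordiv (3 * c) 3 = c := by
  rw [PySem.Int.floordiv_eq_iff_of_pos (by norm_num)]; omega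

theorem pow2_shiftN (m a : Nat) : (2 : Nat) ^ (2 * m + a) = 2 ^ a * 4 ^ m := by
  rw [pow_add, pow_mul]; norm_num [mul_comm]

theorem pow2_shiftI (m a : Nat) : (2 : Int) ^ (2 * m + a) = 2 ^ a * 4 ^ m := by
  rw [pow_add, pow_mul]; norm_num [mul_comm]

theorem condP_iff (n : Int) (m : Nat) :
    condP n (2 * (m : Int)) = true ↔ ((4 : Int) ^ m + 2 ≤ 3 * n ∧ 3 * n ≤ 4 * 4 ^ m - 1) := by
  obtain ⟨c, hc⟩ := four_pow_decomp m
  have h2 : (2 : Int) * (m : Int) = ((2 * m : Nat) : Int) := by push_cast; ring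
  have hp : pyPow 2 (2 * (m : Int)) = (4 : Int) ^ m := by
    rw [pyPow, h2, Int.toNat_natCast, pow_mul]; norm_num
  have h4 : (4 : Int) ^ m = 3 * (c : Int) + 1 := by exact_mod_cast hc
  have hd : PySem.Int.floordiv (pyPow 2 (2 * (m : Int)) - 1) 3 = (c : Int) := by
    rw [hp, h4]; have : (3 : Int) * c + 1 - 1 = 3 * c := by ring
    rw [this, fdiv3]
  rw [condP, decide_eq_true_iff, hd, hp, h4]
  constructor <;> intro h <;> omega

theorem condN_iff (n : Int) (m : Nat) :
    condN n (2 * (m : Int) + 1) = true ↔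
      (-(8 * (4 : Int) ^ m) + 2 ≤ 3 * n ∧ 3 * n ≤ -(2 * 4 ^ m) - 1) := by
  obtain ⟨c, hc⟩ := four_pow_decomp m
  have h4 : (4 : Int) ^ m = 3 * (c : Int) + 1 := by exact_mod_cast hc
  have hpm : pyPow 2 (2 * (m : Int) + 1 - 1) = (4 : Int) ^ m := by
    have h2 : (2 : Int) * (m : Int) + 1 - 1 = ((2 * m : Nat) : Int) := by push_cast; ring
    rw [pyPow, h2, Int.toNat_natCast, pow_mul]; norm_num
  have hpj : pyPow 2 (2 * (m : Int) + 1) = 2 * (4 : Int) ^ m := by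
    have h2 : (2 : Int) * (m : Int) + 1 = ((2 * m + 1 : Nat) : Int) := by push_cast; ring
    rw [pyPow, h2, Int.toNat_natCast, pow2_shiftI]; norm_num
  have hpp : pyPow 2 (2 * (m : Int) + 1 + 1) = 4 * (4 : Int) ^ m := by
    have h2 : (2 : Int) * (m : Int) + 1 + 1 = ((2 * m + 2 : Nat) : Int) := by push_cast; ring
    rw [pyPow, h2, Int.toNat_natCast, pow2_shiftI]; norm_num
  have hd1 : PySem.Int.floordiv (pyPow 2 (2 * (m : Int) + 1 - 1) - 1) 3 = (c : Int) := by
    rw [hpm, h4]; have : (3 : Int) * c + 1 - 1 = 3 * c := by ring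
    rw [this, fdiv3]
  have hd2 : PySem.Int.floordiv (pyPow 2 (2 * (m : Int) + 1 + 1) - 1) 3 = 4 * (c : Int) + 1 := by
    rw [hpp, h4]
    have : 4 * ((3 : Int) * c + 1) - 1 = 3 * (4 * c + 1) := by ring
    rw [this, fdiv3]
  rw [condN, decide_eq_true_iff, hpj, hd1, hd2, h4]
  constructor <;> intro h <;> omega

theorem loopA_eq (cond : Int → Bool) (d : Nat) :
    ∀ (f : Nat) (j : Int), d < f → cond (j + 2 * (d : Int)) = true →
      (∀ i : Nat, i < d → cond (j + 2 * (i : Int)) = false) →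
      loopA cond f j = j + 2 * (d : Int) := by
  induction d with
  | zero =>
    intro f j hf hT _
    obtain ⟨f', rfl⟩ : ∃ f', f = f' + 1 := ⟨f - 1, by omega⟩
    have hT' : cond j = true := by simpa using hT
    simp only [loopA, hT', if_true]
    simp
  | succ d ih =>
    intro f j hf hT hF
    obtain ⟨f', rfl⟩ : ∃ f', f = f' + 1 := ⟨f - 1, by omega⟩
    have h0 : cond j = false := by simpa using hF 0 (by omega)
    simp only [loopA, h0, Bool.false_eq_true, if_false]
    have := ih f' (j + 2) (by omega)
      (by convert hT using 2; push_cast; ring)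
      (by intro i hi
          have := hF (i + 1) (by omega)
          convert this using 2; push_cast; ring)
    rw [this]; push_cast; ring

theorem pos_loop (n : Int) (h1 : 1 ≤ n) (hD : n ≤ 2147483648) :
    loopA (condP n) 100 0 =
      2 * ((((PySem.Int.bitLength (3 * n) + 1) / 2 : Nat)) : Int) - 2 := by
  set L := PySem.Int.bitLength (3 * n) with hL
  set X := (3 * n).natAbs with hX
  have hXv : (X : Int) = 3 * n := Int.natAbs_of_nonneg (by omega)
  have hub : X < 2 ^ L := PySem.Int.lt_two_pow_bitLength (3 * n)
  have hlb : 2 ^ (L - 1) ≤ X := PySem.Int.two_pow_bitLength_le (3 * n) (by omega)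
  have hX3 : 3 ≤ X := by omega
  have hX31 : X ≤ 3 * 2147483648 := by omega
  have hXd : ∃ P : Nat, X = 3 * P := ⟨n.toNat, by omega⟩
  have hL2 : 2 ≤ L := by
    by_contra h
    have : (2 : Nat) ^ L ≤ 2 ^ 1 := Nat.pow_le_pow_right (by norm_num) (by omega)
    omega
  set t := (L + 1) / 2 with ht
  have ht1 : 1 ≤ t := by omega
  have h2t : L ≤ 2 * t ∧ 2 * t ≤ L + 1 := by omega
  -- true at m = t - 1
  have hTrue : condP n (2 * ((t - 1 : Nat) : Int)) = true := by
    rw [condP_iff]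
    obtain ⟨c, hc⟩ := four_pow_decomp (t - 1)
    obtain ⟨P, hP⟩ := hXd
    have hml : (4 : Nat) ^ (t - 1) ≤ X := by
      calc (4 : Nat) ^ (t - 1) = 2 ^ (2 * (t - 1)) := by rw [pow_mul]; norm_num
        _ ≤ 2 ^ (L - 1) := Nat.pow_le_pow_right (by norm_num) (by omega)
        _ ≤ X := hlb
    have hmu : X < 4 * 4 ^ (t - 1) := by
      have : (4 : Nat) * 4 ^ (t - 1) = 2 ^ (2 * (t - 1) + 2) := by rw [pow2_shiftN]; ring
      have h2 : (2 : Nat) ^ L ≤ 2 ^ (2 * (t - 1) + 2) := Nat.pow_le_pow_right (by norm_num) (by omega)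
      omega
    have hlow : (4 : Nat) ^ (t - 1) + 2 ≤ X := by omega
    constructor
    · have : ((4 : Nat) ^ (t - 1) + 2 : Int) ≤ (X : Int) := by exact_mod_cast hlow
      push_cast at this ⊢; omega
    · have : ((X : Nat) : Int) < ((4 * 4 ^ (t - 1) : Nat) : Int) := by exact_mod_cast hmu
      push_cast at this ⊢; omega
  -- false below
  have hFalse : ∀ i : Nat, i < t - 1 → condP n (2 * (i : Int)) = false := by
    intro i hi
    cases h : condP n (2 * (i : Int)) with
    | false => rfl
    | true =>
      exfalso
      rw [condP_iff] at h
      have hge : (4 : Nat) * 4 ^ i ≤ X := by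
        calc (4 : Nat) * 4 ^ i = 2 ^ (2 * i + 2) := by rw [pow2_shiftN]; ring
          _ ≤ 2 ^ (L - 1) := Nat.pow_le_pow_right (by norm_num) (by omega)
          _ ≤ X := hlb
      have : ((4 * 4 ^ i : Nat) : Int) ≤ (X : Int) := by exact_mod_cast hge
      push_cast at this
      omega
  -- fuel bound
  have hsmall : t - 1 < 17 := by
    by_contra h
    have : (4 : Nat) ^ 17 ≤ 4 ^ (t - 1) := Nat.pow_le_pow_right (by norm_num) (by omega)
    have h2 : (4 : Nat) ^ (t - 1) ≤ X := by
      calc (4 : Nat) ^ (t - 1) = 2 ^ (2 * (t - 1)) := by rw [pow_mul]; norm_num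
        _ ≤ 2 ^ (L - 1) := Nat.pow_le_pow_right (by norm_num) (by omega)
        _ ≤ X := hlb
    norm_num at this
    omega
  have := loopA_eq (condP n) (t - 1) 100 0 (by omega)
    (by simpa using hTrue)
    (by intro i hi; simpa using hFalse i hi)
  rw [this]; omega

theorem neg_loop (n : Int) (h1 : n ≤ -1) (hD : -2147483648 ≤ n) :
    loopA (condN n) 100 1 =
      1 + 2 * ((((PySem.Int.bitLength (3 * (-n) + 1) - 2) / 2 : Nat)) : Int) := by
  set L := PySem.Int.bitLength (3 * (-n) + 1) with hL
  set X := (3 * (-n) + 1).natAbs with hX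
  have hXv : (X : Int) = 3 * (-n) + 1 := Int.natAbs_of_nonneg (by omega)
  have hub : X < 2 ^ L := PySem.Int.lt_two_pow_bitLength _
  have hlb : 2 ^ (L - 1) ≤ X := PySem.Int.two_pow_bitLength_le _ (by omega)
  have hX4 : 4 ≤ X := by omega
  have hXd : ∃ P : Nat, X = 3 * P + 1 := ⟨(-n).toNat, by omega⟩
  have hL3 : 3 ≤ L := by
    by_contra h
    have : (2 : Nat) ^ L ≤ 2 ^ 2 := Nat.pow_le_pow_right (by norm_num) (by omega)
    omega
  set m := (L - 2) / 2 with hm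
  have h2m : L - 3 ≤ 2 * m ∧ 2 * m ≤ L - 2 := by omega
  obtain ⟨P, hP⟩ := hXd
  -- true at m
  have hTrue : condN n (2 * (m : Int) + 1) = true := by
    rw [condN_iff]
    obtain ⟨c, hc⟩ := four_pow_decomp m
    have hup : X < 8 * 4 ^ m := by
      have he : (8 : Nat) * 4 ^ m = 2 ^ (2 * m + 3) := by rw [pow2_shiftN]; ring
      have h2 : (2 : Nat) ^ L ≤ 2 ^ (2 * m + 3) := Nat.pow_le_pow_right (by norm_num) (by omega)
      omega
    have hlo : 2 * 4 ^ m + 2 ≤ X := by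
      rcases Nat.eq_zero_or_pos m with hm0 | hm0
      · simp [hm0]; omega
      · have : (2 : Nat) * 4 ^ m ≤ X := by
          calc (2 : Nat) * 4 ^ m = 2 ^ (2 * m + 1) := by rw [pow2_shiftN]; ring
            _ ≤ 2 ^ (L - 1) := Nat.pow_le_pow_right (by norm_num) (by omega)
            _ ≤ X := hlb
        omega
    constructor
    · have : ((X : Nat) : Int) < ((8 * 4 ^ m : Nat) : Int) := by exact_mod_cast hup
      push_cast at this ⊢; omega
    · have : ((2 * 4 ^ m + 2 : Nat) : Int) ≤ (X : Int) := by exact_mod_cast hlo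
      push_cast at this ⊢; omega
  -- false below
  have hFalse : ∀ i : Nat, i < m → condN n (2 * (i : Int) + 1) = false := by
    intro i hi
    cases h : condN n (2 * (i : Int) + 1) with
    | false => rfl
    | true =>
      exfalso
      rw [condN_iff] at h
      have hge : (8 : Nat) * 4 ^ i ≤ X := by
        calc (8 : Nat) * 4 ^ i = 2 ^ (2 * i + 3) := by rw [pow2_shiftN]; ring
          _ ≤ 2 ^ (L - 1) := Nat.pow_le_pow_right (by norm_num) (by omega)
          _ ≤ X := hlb
      have : ((8 * 4 ^ i : Nat) : Int) ≤ (X : Int) := by exact_mod_cast hge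
      push_cast at this
      omega
  have hsmall : m < 17 := by
    by_contra h
    have h2 : (4 : Nat) ^ m ≤ X := by
      rcases Nat.eq_zero_or_pos m with hm0 | hm0
      · omega
      · calc (4 : Nat) ^ m = 2 ^ (2 * m) := by rw [pow_mul]; norm_num
          _ ≤ 2 ^ (L - 1) := Nat.pow_le_pow_right (by norm_num) (by omega)
          _ ≤ X := hlb
    have : (4 : Nat) ^ 17 ≤ 4 ^ m := Nat.pow_le_pow_right (by norm_num) (by omega)
    norm_num at this
    omega
  have hshift : ∀ i : Nat, (1 : Int) + 2 * (i : Int) = 2 * (i : Int) + 1 := by intro i; ring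
  have := loopA_eq (condN n) m 100 1 (by omega)
    (by rw [hshift]; exact hTrue)
    (by intro i hi; rw [hshift]; exact hFalse i hi)
  rw [this]

-- ===== VERDICT (by name: the statement is the Claim_ definition above) =====
theorem check_spec : Claim_equal_check := by
  intro n hD
  have hDn : -2147483648 ≤ n ∧ n ≤ 2147483648 := by
    simpa [Dom_check, pvDomInt] using hD
  unfold Spec_check check check_alt
  rcases lt_trichotomy n 0 with hlt | heq | hgt
  · -- negative
    rw [if_neg (by omega), if_pos hlt, if_neg (by omega), if_neg (by omega)]
    have hk := neg_loop n (by omega) hDn.1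
    have hbl : 3 ≤ PySem.Int.bitLength (3 * (-n) + 1) := by
      by_contra h
      have := PySem.Int.two_pow_bitLength_le (3 * (-n) + 1) (by omega)
      have h2 : (2 : Nat) ^ (PySem.Int.bitLength (3 * (-n) + 1) - 1) ≤ 2 ^ 1 :=
        Nat.pow_le_pow_right (by norm_num) (by omega)
      have h3 : (3 * (-n) + 1).natAbs < 2 ^ PySem.Int.bitLength (3 * (-n) + 1) :=
        PySem.Int.lt_two_pow_bitLength _
      have h4 : (2 : Nat) ^ PySem.Int.bitLength (3 * (-n) + 1) ≤ 2 ^ 2 :=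
        Nat.pow_le_pow_right (by norm_num) (by omega)
      have h5 : ((3 * (-n) + 1).natAbs : Int) = 3 * (-n) + 1 := Int.natAbs_of_nonneg (by omega)
      omega
    have hfd : PySem.Int.floordiv ((PySem.Int.bitLength (3 * (-n) + 1) : Int) - 2) 2 =
        (((PySem.Int.bitLength (3 * (-n) + 1) - 2) / 2 : Nat) : Int) := by
      have hc : ((PySem.Int.bitLength (3 * (-n) + 1) : Int) - 2) =
          (((PySem.Int.bitLength (3 * (-n) + 1) - 2 : Nat)) : Int) := by
        omega
      rw [hc]
      exact_mod_cast PySem.Int.floordiv_natCast (PySem.Int.bitLength (3 * (-n) + 1) - 2) 2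
    have hmax : max (0 : Int) (((PySem.Int.bitLength (3 * (-n) + 1) - 2) / 2 : Nat) : Int) =
        (((PySem.Int.bitLength (3 * (-n) + 1) - 2) / 2 : Nat) : Int) := by
      apply max_eq_right; positivity
    simp only [hk, hfd, hmax, pyPow]
    have e : (1 : Int) + 2 * (((PySem.Int.bitLength (3 * (-n) + 1) - 2) / 2 : Nat) : Int) =
        2 * (((PySem.Int.bitLength (3 * (-n) + 1) - 2) / 2 : Nat) : Int) + 1 := by ring
    rw [e]
  · simp [heq]
  · -- positive
    rw [if_pos hgt, if_neg (by omega), if_pos hgt]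
    have hk := pos_loop n (by omega) hDn.2
    have hfd : PySem.Int.floordiv ((PySem.Int.bitLength (3 * n) : Int) + 1) 2 =
        (((PySem.Int.bitLength (3 * n) + 1) / 2 : Nat) : Int) := by
      have hc : ((PySem.Int.bitLength (3 * n) : Int) + 1) =
          (((PySem.Int.bitLength (3 * n) + 1 : Nat)) : Int) := by push_cast; ring
      rw [hc]
      exact_mod_cast PySem.Int.floordiv_natCast (PySem.Int.bitLength (3 * n) + 1) 2
    simp only [hk, hfd, pyPow]
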